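-- pv_equiv track=rewrite | github.com/omidziaee/DataStructure | InterviewCake/shuflle_deck_of_card.py | is_single_riffle
-- ===== SOURCE A (Python) =====
-- def is_single_riffle(half1, half2, shuffled_deck, half1_index = 0,\
-- half2_index = 0, shuffled_deck_index = 0):
--     if len(shuffled_deck) == shuffled_deck_index:
--         return True
--     if (half1_index < len(half1) and half1[half1_index] == shuffled_deck[shuffled_deck_index]):
--         half1_index += 1
--     elif (half2_index < len(half2) and half2[half2_index] == shuffled_deck[shuffled_deck_index]):
--         half2_index += 1
--     else:
--         return False
--     shuffled_deck_index += 1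
--     return is_single_riffle(half1, half2, shuffled_deck, half1_index, half2_index, shuffled_deck_index)
-- ===== SOURCE B (Python) =====
-- def is_single_riffle(half1, half2, shuffled_deck, half1_index=0, half2_index=0, shuffled_deck_index=0):
--     i, j = half1_index, half2_index
--     for s in range(shuffled_deck_index, len(shuffled_deck)):
--         card = shuffled_deck[s]
--         if i < len(half1) and half1[i] == card:
--             i += 1
--         elif j < len(half2) and half2[j] == card:
--             j += 1
--         else:
--             return False
--     return True
-- ===== Notes on version B (the rewrite author's own statement) =====
-- stated objective: idiomatic
-- what changed: Replaces A's tail recursion (one Python call frame per card, hitting the recursion limit on large decks) with a single for-loop over range(shuffled_deck_index, len(shuffled_deck)) carrying the two half cursors.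
-- outside the precondition, e.g. on is_single_riffle([], [], [1], 0, 0, 5): A returns False, B returns True; on is_single_riffle([1], [], [1], 0, 0, 5): A raises IndexError, B returns True; on is_single_riffle([1, 2], [], [1, 2], 0, -5, 0): A returns True, B returns True
import Mathlib
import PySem

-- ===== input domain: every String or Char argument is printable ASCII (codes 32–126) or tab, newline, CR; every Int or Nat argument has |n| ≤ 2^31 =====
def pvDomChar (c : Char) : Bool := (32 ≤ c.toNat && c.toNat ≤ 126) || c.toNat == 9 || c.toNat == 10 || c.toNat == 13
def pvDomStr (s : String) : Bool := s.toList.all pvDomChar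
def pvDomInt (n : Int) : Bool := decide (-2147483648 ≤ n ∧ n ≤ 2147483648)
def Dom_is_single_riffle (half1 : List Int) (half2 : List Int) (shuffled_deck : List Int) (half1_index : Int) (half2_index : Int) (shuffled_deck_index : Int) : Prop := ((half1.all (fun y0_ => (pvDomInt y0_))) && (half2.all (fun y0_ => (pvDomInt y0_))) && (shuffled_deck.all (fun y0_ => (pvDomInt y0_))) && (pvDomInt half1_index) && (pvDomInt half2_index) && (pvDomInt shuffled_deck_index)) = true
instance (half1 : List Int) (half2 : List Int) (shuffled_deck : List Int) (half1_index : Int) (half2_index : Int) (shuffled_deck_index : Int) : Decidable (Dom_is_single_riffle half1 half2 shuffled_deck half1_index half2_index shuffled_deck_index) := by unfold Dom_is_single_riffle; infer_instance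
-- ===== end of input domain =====

-- ===== PORT A =====
-- B replaces A's per-card tail recursion by one loop over range(shuffled_deck_index, len(shuffled_deck));
-- equivalence on starting indices in Python's index range (Pre_ below).
-- Port of A: the recursion, with fuel making it total (fuel is always sufficient under Pre_).
def pvLoopA (half1 : List Int) (half2 : List Int) (shuffled_deck : List Int) (h1 : Int) (h2 : Int) (s : Int) : Nat → Bool
  | 0 => false
  | fuel + 1 =>
    if (shuffled_deck.length : Int) = s then true
    else if decide (h1 < (half1.length : Int)) && (PySem.List.pyGet? half1 h1 == PySem.List.pyGet? shuffled_deck s) then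
      pvLoopA half1 half2 shuffled_deck (h1 + 1) h2 (s + 1) fuel
    else if decide (h2 < (half2.length : Int)) && (PySem.List.pyGet? half2 h2 == PySem.List.pyGet? shuffled_deck s) then
      pvLoopA half1 half2 shuffled_deck h1 (h2 + 1) (s + 1) fuel
    else false

def is_single_riffle (half1 : List Int) (half2 : List Int) (shuffled_deck : List Int) (half1_index : Int) (half2_index : Int) (shuffled_deck_index : Int) : Bool :=
  pvLoopA half1 half2 shuffled_deck half1_index half2_index shuffled_deck_index
    (shuffled_deck.length + shuffled_deck.length + 1)

-- ===== PORT B =====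
-- one step of B's for-loop body at deck position s; state none = the early 'return False' has fired
def pvStepB (half1 : List Int) (half2 : List Int) (shuffled_deck : List Int) (st : Option (Int × Int)) (s : Int) : Option (Int × Int) :=
  match st with
  | none => none
  | some (i, j) =>
    let card := PySem.List.pyGetD shuffled_deck s 0
    if decide (i < (half1.length : Int)) && (PySem.List.pyGet? half1 i == some card) then some (i + 1, j)
    else if decide (j < (half2.length : Int)) && (PySem.List.pyGet? half2 j == some card) then some (i, j + 1)
    else none

def is_single_riffle_alt (half1 : List Int) (half2 : List Int) (shuffled_deck : List Int) (half1_index : Int) (half2_index : Int) (shuffled_deck_index : Int) : Bool :=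
  ((PySem.List.pyRange shuffled_deck_index (shuffled_deck.length : Int) 1).foldl
    (pvStepB half1 half2 shuffled_deck) (some (half1_index, half2_index))).isSome

-- ===== PRECONDITION & SPEC =====
-- Pre_ excludes deck start indices beyond Python's index range (A raises IndexError there, except
-- that with both half cursors exhausted it returns False without examining a card), and, when cards
-- remain, half cursors below -len (A raises IndexError when such a cursor is consulted).
def Pre_is_single_riffle (half1 : List Int) (half2 : List Int) (shuffled_deck : List Int) (half1_index : Int) (half2_index : Int) (shuffled_deck_index : Int) : Prop :=
  -(shuffled_deck.length : Int) ≤ shuffled_deck_index ∧ shuffled_deck_index ≤ (shuffled_deck.length : Int) ∧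
  (shuffled_deck_index = (shuffled_deck.length : Int) ∨
    (-(half1.length : Int) ≤ half1_index ∧ -(half2.length : Int) ≤ half2_index))
instance (half1 : List Int) (half2 : List Int) (shuffled_deck : List Int) (half1_index : Int) (half2_index : Int) (shuffled_deck_index : Int) : Decidable (Pre_is_single_riffle half1 half2 shuffled_deck half1_index half2_index shuffled_deck_index) := by unfold Pre_is_single_riffle; infer_instance

def pvWitness_is_single_riffle : List Int × List Int × List Int × Int × Int × Int :=
  ([1, 3], [2, 4], [1, 2, 3, 4], 0, 0, 0)

def Spec_is_single_riffle (half1 : List Int) (half2 : List Int) (shuffled_deck : List Int) (half1_index : Int) (half2_index : Int) (shuffled_deck_index : Int) (out : Bool) : Prop := out = is_single_riffle_alt half1 half2 shuffled_deck half1_index half2_index shuffled_deck_index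
instance (half1 : List Int) (half2 : List Int) (shuffled_deck : List Int) (half1_index : Int) (half2_index : Int) (shuffled_deck_index : Int) (out : Bool) : Decidable (Spec_is_single_riffle half1 half2 shuffled_deck half1_index half2_index shuffled_deck_index out) := by unfold Spec_is_single_riffle; infer_instance

-- ===== CLAIM (what is proved, stated in full; the proofs are below) =====
def Claim_equal_is_single_riffle : Prop := ∀ (half1 : List Int) (half2 : List Int) (shuffled_deck : List Int) (half1_index : Int) (half2_index : Int) (shuffled_deck_index : Int), Dom_is_single_riffle half1 half2 shuffled_deck half1_index half2_index shuffled_deck_index → Pre_is_single_riffle half1 half2 shuffled_deck half1_index half2_index shuffled_deck_index → Spec_is_single_riffle half1 half2 shuffled_deck half1_index half2_index shuffled_deck_index (is_single_riffle half1 half2 shuffled_deck half1_index half2_index shuffled_deck_index)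

-- ===== LEMMAS AND PROOFS =====
lemma pyGet?_eq_some_pyGetD (deck : List Int) (s : Int)
    (hlo : -(deck.length : Int) ≤ s) (hhi : s < (deck.length : Int)) :
    PySem.List.pyGet? deck s = some (PySem.List.pyGetD deck s 0) := by
  by_cases hs : 0 ≤ s
  · rw [PySem.List.pyGet?_eq_some_getElem _ hs hhi, PySem.List.pyGetD_eq_getElem _ _ hs hhi]
  · have hk0 : 0 < (-s).toNat := by omega
    have hkl : (-s).toNat ≤ deck.length := by omega
    have hse : s = -(((-s).toNat : Nat) : Int) := by omega
    rw [hse, PySem.List.pyGet?_neg_natCast _ _ hk0 hkl, PySem.List.pyGetD_neg_natCast _ _ _ hk0 hkl,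
      List.getElem?_eq_getElem]

lemma foldl_pvStepB_none (half1 half2 shuffled_deck : List Int) (l : List Int) :
    l.foldl (pvStepB half1 half2 shuffled_deck) none = none := by
  induction l with
  | nil => rfl
  | cons a l ih => simpa [pvStepB] using ih

lemma pvLoopA_eq_foldB (half1 half2 shuffled_deck : List Int) (fuel : Nat) :
    ∀ (h1 h2 s : Int), -(shuffled_deck.length : Int) ≤ s → s ≤ (shuffled_deck.length : Int) →
      (shuffled_deck.length : Int) - s < (fuel : Int) →
      pvLoopA half1 half2 shuffled_deck h1 h2 s fuel =
        ((PySem.List.pyRange s (shuffled_deck.length : Int) 1).foldl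
          (pvStepB half1 half2 shuffled_deck) (some (h1, h2))).isSome := by
  induction fuel with
  | zero => intro h1 h2 s hlo hsl hf; omega
  | succ fuel ih =>
    intro h1 h2 s hlo hsl hf
    by_cases hend : (shuffled_deck.length : Int) = s
    · have hr : PySem.List.pyRange s (shuffled_deck.length : Int) 1 = [] := by
        rw [PySem.List.pyRange_one,
          show ((shuffled_deck.length : Int) - s).toNat = 0 by omega]
        rfl
      rw [hr]
      simp [pvLoopA, hend]
    · have hlt : s < (shuffled_deck.length : Int) := lt_of_le_of_ne hsl (fun h => hend h.symm)
      have hget := pyGet?_eq_some_pyGetD shuffled_deck s hlo hlt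
      have hstep : pvStepB half1 half2 shuffled_deck (some (h1, h2)) s =
          (if decide (h1 < (half1.length : Int)) && (PySem.List.pyGet? half1 h1 == PySem.List.pyGet? shuffled_deck s) then some (h1 + 1, h2)
           else if decide (h2 < (half2.length : Int)) && (PySem.List.pyGet? half2 h2 == PySem.List.pyGet? shuffled_deck s) then some (h1, h2 + 1)
           else none) := by
        rw [hget]; rfl
      have hloop : pvLoopA half1 half2 shuffled_deck h1 h2 s (fuel + 1) =
          (if decide (h1 < (half1.length : Int)) && (PySem.List.pyGet? half1 h1 == PySem.List.pyGet? shuffled_deck s) then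
            pvLoopA half1 half2 shuffled_deck (h1 + 1) h2 (s + 1) fuel
           else if decide (h2 < (half2.length : Int)) && (PySem.List.pyGet? half2 h2 == PySem.List.pyGet? shuffled_deck s) then
            pvLoopA half1 half2 shuffled_deck h1 (h2 + 1) (s + 1) fuel
           else false) := by
        rw [pvLoopA, if_neg hend]
      rw [PySem.List.pyRange_one_cons hlt, List.foldl_cons, hstep, hloop]
      by_cases hg1 : (decide (h1 < (half1.length : Int)) && (PySem.List.pyGet? half1 h1 == PySem.List.pyGet? shuffled_deck s)) = true
      · rw [if_pos hg1, if_pos hg1, ih (h1 + 1) h2 (s + 1) (by omega) (by omega) (by omega)]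
      · by_cases hg2 : (decide (h2 < (half2.length : Int)) && (PySem.List.pyGet? half2 h2 == PySem.List.pyGet? shuffled_deck s)) = true
        · rw [if_neg hg1, if_pos hg2, if_neg hg1, if_pos hg2,
            ih h1 (h2 + 1) (s + 1) (by omega) (by omega) (by omega)]
        · rw [if_neg hg1, if_neg hg2, if_neg hg1, if_neg hg2, foldl_pvStepB_none]
          rfl

-- ===== VERDICT (by name: the statement is the Claim_ definition above) =====
theorem is_single_riffle_spec : Claim_equal_is_single_riffle := by
  intro half1 half2 shuffled_deck h1 h2 s _ hpre
  obtain ⟨hlo, hsl, _⟩ := hpre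
  unfold Spec_is_single_riffle is_single_riffle is_single_riffle_alt
  exact pvLoopA_eq_foldB half1 half2 shuffled_deck _ h1 h2 s hlo hsl (by push_cast; omega)
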